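-- pv_equiv track=rewrite | github.com/AdamOtto/Daily-Challenges | Challenge868.py | Solution
-- ===== SOURCE A (Python) =====
-- def Solution(ar):
--     d = {}
--     for a in ar:
--         if a not in d:
--             d[a] = 0
--         d[a] += 1
--     odds = 0
--     for key, val in d.items():
--         if val % 2 >= 1:
--             odds += 1
--         if odds >= 2:
--             return False
--     return True
-- ===== SOURCE B (Python) =====
-- def Solution(ar):
--     s = sorted(ar)
--     n = len(s)
--     odds = 0
--     i = 0
--     while i < n:
--         run = 1
--         while i + run < n and s[i + run] == s[i]:
--             run += 1
--         odds += run % 2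
--         i += run
--     return odds <= 1
-- ===== Notes on version B (the rewrite author's own statement) =====
-- stated objective: alternative
-- what changed: Replaces hash-based counting (dict of counts plus a scan over its items) with sort-then-run-length-scan: sort the list so equal elements are adjacent, scan consecutive runs, and count runs of odd length.
import Mathlib
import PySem

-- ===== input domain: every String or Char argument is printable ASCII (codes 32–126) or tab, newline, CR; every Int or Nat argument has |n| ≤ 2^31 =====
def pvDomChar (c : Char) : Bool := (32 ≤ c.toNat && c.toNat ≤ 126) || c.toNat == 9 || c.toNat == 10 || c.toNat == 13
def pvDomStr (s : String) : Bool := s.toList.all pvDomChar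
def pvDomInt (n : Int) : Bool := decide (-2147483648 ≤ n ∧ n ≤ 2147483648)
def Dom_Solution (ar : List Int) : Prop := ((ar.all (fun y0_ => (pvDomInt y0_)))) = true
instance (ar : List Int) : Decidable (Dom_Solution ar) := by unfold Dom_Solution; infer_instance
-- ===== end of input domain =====

-- B sorts the list and scans consecutive runs, counting runs of odd length, instead of A's
-- hash-count dictionary plus a second scan over its items; a different algorithm, not faster.

-- ===== PORT A =====
-- the body of A's first loop: 'if a not in d: d[a] = 0' then 'd[a] += 1'
def solBuildStep (d : PySem.Dict Int Int) (a : Int) : PySem.Dict Int Int :=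
  let d := if d.contains a then d else d.insert a 0
  d.insert a (d.getD a 0 + 1)

-- A's second loop: 'for key, val in d.items(): …' with its early 'return False'
def solOdds : List (Int × Int) → Int → Bool
  | [], _ => true
  | (_, v) :: rest, odds =>
    let odds := if PySem.Int.mod v 2 ≥ 1 then odds + 1 else odds
    if odds ≥ 2 then false else solOdds rest odds

def Solution (ar : List Int) : Bool :=
  solOdds ((ar.foldl solBuildStep PySem.Dict.empty).items) 0

-- ===== PORT B =====
-- B's inner while: extend the run while s[i + run] == s[i]
def solInner (s : List Int) (i run : Nat) : Nat :=
  if _h : i + run < s.length ∧ s.getD (i + run) 0 = s.getD i 0 then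
    solInner s i (run + 1)
  else run
termination_by s.length - (i + run)
decreasing_by omega

-- cited by solOuter's decreasing_by: the inner while never shortens the run
lemma solInner_ge (s : List Int) (i : Nat) : ∀ run, run ≤ solInner s i run := by
  intro run
  induction hn : s.length - (i + run) using Nat.strong_induction_on generalizing run with
  | _ n ih =>
    subst hn
    rw [solInner]
    split
    · exact le_trans (Nat.le_succ run) (ih (s.length - (i + (run + 1))) (by omega) (run + 1) rfl)
    · exact le_rfl

-- B's outer while: scan runs, adding run % 2 to odds and advancing i by run
def solOuter (s : List Int) (i odds : Nat) : Nat :=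
  if _h : i < s.length then
    let run := solInner s i 1
    solOuter s (i + run) (odds + run % 2)
  else odds
termination_by s.length - i
decreasing_by
  have h1 : 1 ≤ solInner s i 1 := solInner_ge s i 1
  omega

def Solution_alt (ar : List Int) : Bool :=
  decide (solOuter (PySem.List.sorted ar (fun x => x) false) 0 0 ≤ 1)

-- ===== PRECONDITION & SPEC =====
def Spec_Solution (ar : List Int) (out : Bool) : Prop := out = Solution_alt ar
instance (ar : List Int) (out : Bool) : Decidable (Spec_Solution ar out) := by unfold Spec_Solution; infer_instance

-- ===== CLAIM (what is proved, stated in full; the proofs are below) =====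
def Claim_equal_Solution : Prop := ∀ (ar : List Int), Dom_Solution ar → Spec_Solution ar (Solution ar)

-- ===== LEMMAS AND PROOFS =====

-- proof-side model of B's inner while: eat leading elements equal to a
def solEat (a : Int) : List Int → Nat → (Nat × List Int)
  | [], run => (run, [])
  | x :: xs, run => if x = a then solEat a xs (run + 1) else (run, x :: xs)

lemma solEat_len (a : Int) (xs : List Int) (run : Nat) :
    (solEat a xs run).2.length ≤ xs.length := by
  induction xs generalizing run with
  | nil => simp [solEat]
  | cons x xs ih =>
    simp only [solEat]
    split
    · exact le_trans (ih _) (by simp)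
    · simp

-- proof-side model of B's scan, consuming the list suffix run by run
def solOddRuns : List Int → Nat → Nat
  | [], odds => odds
  | a :: rest, odds =>
    let p := solEat a rest 1
    solOddRuns p.2 (odds + p.1 % 2)
termination_by l _ => l.length
decreasing_by
  have := solEat_len a rest 1
  simpa using Nat.lt_succ_of_le this


-- invariant of A's counting loop
lemma build_inv (ar : List Int) :
    (ar.foldl solBuildStep PySem.Dict.empty).keys.Nodup ∧
    (ar.foldl solBuildStep PySem.Dict.empty).keys = PySem.Set.ofList ar ∧
    ∀ k, (ar.foldl solBuildStep PySem.Dict.empty).getD k 0 = (ar.count k : Int) := by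
  induction ar using List.reverseRecOn with
  | nil => simp [PySem.Dict.empty, PySem.Dict.keys, PySem.Dict.getD, PySem.Dict.get?, PySem.Set.ofList]
  | append_singleton xs a ih =>
    obtain ⟨hnd, hkeys, hget⟩ := ih
    rw [List.foldl_append, List.foldl_cons, List.foldl_nil]
    set d := xs.foldl solBuildStep PySem.Dict.empty with hd
    by_cases h : d.contains a = true
    · have hamem : a ∈ xs := by
        have := (PySem.Dict.contains_iff_mem_keys d a).mp h
        rw [hkeys] at this
        exact (PySem.Set.mem_ofList _ _).mp this
      have step : solBuildStep d a = d.insert a (d.getD a 0 + 1) := by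
        simp [solBuildStep, h]
      rw [step]
      refine ⟨?_, ?_, ?_⟩
      · rw [PySem.Dict.keys_insert_of_contains d _ h]; exact hnd
      · rw [PySem.Dict.keys_insert_of_contains d _ h, hkeys,
            PySem.Set.ofList_append_singleton,
            PySem.Set.add_of_mem ((PySem.Set.mem_ofList _ _).mpr hamem)]
      · intro k
        rw [PySem.Dict.getD_insert]
        by_cases hk : k = a
        · subst hk
          rw [if_pos rfl, hget k]
          simp [List.count_append]
        · rw [if_neg hk, hget k]
          simp [List.count_append, Ne.symm hk]
    · have hnmem : a ∉ xs := by
        intro hm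
        exact h ((PySem.Dict.contains_iff_mem_keys d a).mpr
          (hkeys ▸ (PySem.Set.mem_ofList _ _).mpr hm))
      have hcf : d.contains a = false := by simpa using h
      have step : solBuildStep d a = (d.insert a 0).insert a ((d.insert a 0).getD a 0 + 1) := by
        simp [solBuildStep, h]
      rw [step, PySem.Dict.getD_insert_self]
      have hkeys2 : ((d.insert a 0).insert a (0 + 1)).keys = d.keys ++ [a] := by
        rw [PySem.Dict.keys_insert_of_contains _ _ (PySem.Dict.contains_insert_self d a 0),
            PySem.Dict.keys_insert_of_not_contains d _ hcf]
      refine ⟨?_, ?_, ?_⟩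
      · rw [hkeys2]
        simp only [List.nodup_append, List.nodup_cons, List.nodup_nil]
        refine ⟨hnd, by simp, ?_⟩
        intro x hx y hy
        rw [List.mem_singleton] at hy
        subst hy
        intro he
        subst he
        exact hnmem ((PySem.Set.mem_ofList _ _).mp (hkeys ▸ hx))
      · rw [hkeys2, hkeys, PySem.Set.ofList_append_singleton,
            PySem.Set.add_of_not_mem (fun hm => hnmem ((PySem.Set.mem_ofList _ _).mp hm))]
      · intro k
        rw [PySem.Dict.getD_insert, PySem.Dict.getD_insert]
        by_cases hk : k = a
        · subst hk
          rw [if_pos rfl]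
          simp [List.count_append, List.count_eq_zero.mpr hnmem]
        · rw [if_neg hk, if_neg hk, hget k]
          simp [List.count_append, Ne.symm hk]

-- A's odds loop counts odd values and stops at 2
lemma solOdds_eq (l : List (Int × Int)) (odds : Int) (h0 : 0 ≤ odds) (h1 : odds ≤ 1) :
    solOdds l odds = decide ((l.countP (fun p => PySem.Int.mod p.2 2 ≥ 1) : Int) + odds ≤ 1) := by
  induction l generalizing odds with
  | nil => simp [solOdds]; omega
  | cons p rest ih =>
    obtain ⟨k, v⟩ := p
    have hcnt : (0:Int) ≤ (rest.countP (fun p => PySem.Int.mod p.2 2 ≥ 1) : Int) := by positivity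
    simp only [solOdds, List.countP_cons]
    by_cases hv : PySem.Int.mod v 2 ≥ 1
    · rw [if_pos hv]
      by_cases h2 : odds + 1 ≥ 2
      · rw [if_pos h2]
        simp only [hv, decide_true, if_pos]
        rw [eq_comm, decide_eq_false_iff_not]
        push_cast
        omega
      · rw [if_neg h2, ih (odds + 1) (by omega) (by omega)]
        simp only [hv, decide_true, if_pos, decide_eq_decide]
        push_cast
        omega
    · rw [if_neg hv, if_neg (by omega : ¬ odds ≥ 2), ih odds h0 h1]
      simp only [decide_eq_decide]
      split_ifs with h
      · exact absurd (of_decide_eq_true h) hv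
      · omega

-- A's oddness test on a value that is a counted occurrence number
lemma modOdd_iff (c : Nat) : PySem.Int.mod (c : Int) 2 ≥ 1 ↔ ¬ 2 ∣ c := by
  have h : PySem.Int.mod (c : Int) 2 = ((c % 2 : Nat) : Int) := by
    exact_mod_cast PySem.Int.mod_natCast c 2
  rw [h]
  omega

-- the number of distinct elements of l occurring an odd number of times
def oddCard (l : List Int) : Nat :=
  (l.toFinset.filter (fun k => ¬ 2 ∣ l.count k)).card

-- B's inner while eats exactly the leading run of equal elements
lemma solEat_spec (a : Int) (xs : List Int) (run : Nat) :
    solEat a xs run =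
      (run + (xs.takeWhile (fun x => decide (x = a))).length,
       xs.dropWhile (fun x => decide (x = a))) := by
  induction xs generalizing run with
  | nil => simp [solEat]
  | cons x xs ih =>
    by_cases h : x = a
    · simp [solEat, h, ih]
      omega
    · simp [solEat, h]

-- B's outer loop on a sorted list computes oddCard
lemma oddRuns_spec (l : List Int) (hs : l.Pairwise (· ≤ ·)) (odds : Nat) :
    solOddRuns l odds = odds + oddCard l := by
  induction hn : l.length using Nat.strong_induction_on generalizing l odds with
  | _ n ih =>
    match l, hs with
    | [], _ => simp [solOddRuns, oddCard]
    | a :: xs, hs =>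
      subst hn
      have hpair := hs
      rw [List.pairwise_cons] at hpair
      obtain ⟨hle, hxs⟩ := hpair
      rw [solOddRuns, solEat_spec]
      set t := xs.takeWhile (fun x => decide (x = a)) with ht
      set r := xs.dropWhile (fun x => decide (x = a)) with hr
      have hxs_split : xs = t ++ r := (List.takeWhile_append_dropWhile).symm
      have htall : ∀ x ∈ t, x = a := by
        intro x hx
        have := List.mem_takeWhile_imp (ht ▸ hx)
        simpa using this
      have hrs : r.Pairwise (· ≤ ·) := hxs.sublist (List.dropWhile_sublist _)
      have hanr : a ∉ r := by
        intro hmem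
        cases hrc : r with
        | nil => rw [hrc] at hmem; simp at hmem
        | cons h' t' =>
          have hdw : xs.dropWhile (fun x => decide (x = a)) = h' :: t' := by
            rw [← hr, hrc]
          rw [hrc] at hmem hrs
          have hne : ¬ (h' = a) := by
            have hx := List.head_dropWhile_not (fun x => decide (x = a))
              (l := xs) (by rw [hdw]; simp)
            simpa [hdw] using hx
          have hah : a ≤ h' := hle h' (by rw [hxs_split, hrc]; simp)
          rcases List.mem_cons.mp hmem with he | hmem'
          · exact hne he.symm
          · have : h' ≤ a := (List.pairwise_cons.mp hrs).1 a hmem'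
            exact hne (le_antisymm this hah)
      have hcount_a : (a :: xs).count a = 1 + t.length := by
        rw [List.count_cons_self, hxs_split, List.count_append,
            List.count_eq_zero.mpr hanr,
            List.count_eq_length.mpr (fun b hb => (htall b hb).symm)]
        omega
      have hcount_ne : ∀ k, k ≠ a → (a :: xs).count k = r.count k := by
        intro k hk
        have h0 : t.count k = 0 := List.count_eq_zero.mpr (fun hm => hk (htall k hm))
        rw [hxs_split]
        simp [List.count_append, h0, Ne.symm hk]
      have hfin : (a :: xs).toFinset = insert a r.toFinset := by
        ext x
        simp only [List.mem_toFinset, Finset.mem_insert, List.mem_cons, hxs_split,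
          List.mem_append]
        constructor
        · rintro (h | h | h)
          · exact Or.inl h
          · exact Or.inl (htall x h)
          · exact Or.inr (by simpa using h)
        · rintro (h | h)
          · exact Or.inl h
          · exact Or.inr (Or.inr (by simpa using h))
      have hcard : oddCard (a :: xs) = (1 + t.length) % 2 + oddCard r := by
        unfold oddCard
        rw [hfin, Finset.filter_insert]
        have hfc : (r.toFinset.filter (fun k => ¬ 2 ∣ (a :: xs).count k)) =
            (r.toFinset.filter (fun k => ¬ 2 ∣ r.count k)) := by
          apply Finset.filter_congr
          intro k hk
          have hk' : k ≠ a := fun he => hanr (he ▸ List.mem_toFinset.mp hk)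
          rw [hcount_ne k hk']
        by_cases hodd : 2 ∣ (1 + t.length)
        · rw [if_neg (by rw [hcount_a]; exact fun hc => hc hodd), hfc]
          omega
        · rw [if_pos (by rw [hcount_a]; exact hodd),
              Finset.card_insert_of_notMem
                (fun hm => hanr (List.mem_toFinset.mp (Finset.mem_of_mem_filter a hm))), hfc]
          omega
      have hrlen : r.length < (a :: xs).length := by
        have : r.length ≤ xs.length := hxs_split ▸ (by simp)
        simpa using Nat.lt_succ_of_le this
      rw [ih r.length (by simpa using hrlen) r hrs _ rfl, hcard]
      omega

-- B's inner while computes solEat on the remaining suffix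
lemma solInner_eq (s : List Int) (i : Nat) :
    ∀ run, solInner s i run = (solEat (s.getD i 0) (s.drop (i + run)) run).1 ∧
      s.drop (i + solInner s i run) = (solEat (s.getD i 0) (s.drop (i + run)) run).2 := by
  intro run
  induction hn : s.length - (i + run) using Nat.strong_induction_on generalizing run with
  | _ n ih =>
    subst hn
    rw [solInner]
    by_cases hlt : i + run < s.length
    · have hdrop : s.drop (i + run) = s.getD (i + run) 0 :: s.drop (i + run + 1) := by
        rw [List.drop_eq_getElem_cons hlt, List.getD_eq_getElem s 0 hlt]
      by_cases heq : s.getD (i + run) 0 = s.getD i 0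
      · have heq' : s[i + run]?.getD 0 = s[i]?.getD 0 := heq
        rw [dif_pos ⟨hlt, heq⟩, hdrop]
        have hrec := ih (s.length - (i + (run + 1))) (by omega) (run + 1) rfl
        simpa [solEat, heq', Nat.add_assoc] using hrec
      · have heq' : ¬ (s[i + run]?.getD 0 = s[i]?.getD 0) := heq
        rw [dif_neg (by tauto), hdrop]
        simp [solEat, heq']
    · rw [dif_neg (by tauto)]
      have hd : s.drop (i + run) = [] := List.drop_eq_nil_of_le (by omega)
      simp [hd, solEat]

-- B's outer while computes solOddRuns on the remaining suffix
lemma solOuter_eq (s : List Int) : ∀ i odds, solOuter s i odds = solOddRuns (s.drop i) odds := by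
  intro i
  induction hn : s.length - i using Nat.strong_induction_on generalizing i with
  | _ n ih =>
    subst hn
    intro odds
    rw [solOuter]
    by_cases hi : i < s.length
    · obtain ⟨h1, h2⟩ := solInner_eq s i 1
      have hdropi : s.drop i = s.getD i 0 :: s.drop (i + 1) := by
        rw [List.drop_eq_getElem_cons hi, List.getD_eq_getElem s 0 hi]
      have hge : 1 ≤ solInner s i 1 := solInner_ge s i 1
      rw [dif_pos hi, ih (s.length - (i + solInner s i 1)) (by omega) _ rfl, hdropi,
          solOddRuns]
      simp only [← h1, h2]
    · rw [dif_neg hi, List.drop_eq_nil_of_le (by omega), solOddRuns]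

-- ===== VERDICT (by name: the statement is the Claim_ definition above) =====
theorem Solution_spec : Claim_equal_Solution := by
  intro ar _hdom
  unfold Spec_Solution Solution Solution_alt
  obtain ⟨hnd, hkeys, hget⟩ := build_inv ar
  set d := ar.foldl solBuildStep PySem.Dict.empty with hd
  set s := PySem.List.sorted ar (fun x => x) false with hsdef
  rw [solOdds_eq _ 0 le_rfl (by omega), solOuter_eq s 0 0]
  rw [show s.drop 0 = s by simp,
      oddRuns_spec s (by simpa using PySem.List.sorted_pairwise ar (fun x => x)) 0]
  have hperm : s.Perm ar := PySem.List.sorted_perm ar (fun x => x) false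
  -- A's countP over items equals oddCard ar
  have hA : d.items.countP (fun p => decide (PySem.Int.mod p.2 2 ≥ 1)) = oddCard ar := by
    have h1 : d.items.countP (fun p => decide (PySem.Int.mod p.2 2 ≥ 1)) =
        d.items.countP (fun p => decide (¬ 2 ∣ ar.count p.1)) := by
      apply List.countP_congr
      intro p hp
      obtain ⟨k, v⟩ := p
      have hv : d.getD k 0 = v := PySem.Dict.getD_of_mem_items d hp hnd 0
      rw [hget k] at hv
      simp only [decide_eq_true_eq]
      rw [← hv]
      exact modOdd_iff (ar.count k)
    have h2 : d.items.countP (fun p => decide (¬ 2 ∣ ar.count p.1)) =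
        d.keys.countP (fun k => decide (¬ 2 ∣ ar.count k)) := by
      show _ = (d.items.map Prod.fst).countP _
      rw [List.countP_map]
      rfl
    have h3 : d.keys.countP (fun k => decide (¬ 2 ∣ ar.count k)) = oddCard ar := by
      unfold oddCard
      rw [List.countP_eq_length_filter]
      have hperm2 : (d.keys.filter (fun k => decide (¬ 2 ∣ ar.count k))).Perm
          ((ar.toFinset.filter (fun k => ¬ 2 ∣ ar.count k)).toList) := by
        rw [List.perm_ext_iff_of_nodup (hnd.filter _) (Finset.nodup_toList _)]
        intro k
        rw [List.mem_filter, Finset.mem_toList, Finset.mem_filter,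
            hkeys, PySem.Set.mem_ofList, List.mem_toFinset]
        simp
      rw [hperm2.length_eq, Finset.length_toList]
    rw [h1, h2, h3]
  -- B's oddCard of the sorted list equals oddCard ar
  have hB : oddCard s = oddCard ar := by
    unfold oddCard
    rw [List.toFinset_eq_of_perm _ _ hperm]
    congr 1
    apply Finset.filter_congr
    intro k _
    rw [hperm.count_eq]
  rw [hA, hB, decide_eq_decide]
  omega
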